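-- pv_equiv track=rewrite | github.com/cirosantilli/project-euler-solvers | solvers/614.py | special_partitions_up_to
-- ===== SOURCE A (Python) =====
-- def special_partitions_up_to(limit: int) -> list[int]:
--     """
--     Compute P(0..limit) exactly (Python big ints) using a 0/1 knapsack DP.
--
--     Allowed parts are: all odd numbers, and all multiples of 4.
--     Distinct parts => iterate parts and update dp in descending order.
--     """
--     if limit < 0:
--         return []
--
--     dp = [0] * (limit + 1)
--     dp[0] = 1
--
--     # Allowed parts <= limit: odd parts and multiples of 4.
--     # Generate in increasing order (order doesn't matter for correctness).
--     parts = []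
--     parts.extend(range(1, limit + 1, 2))  # odds
--     parts.extend(range(4, limit + 1, 4))  # multiples of 4
--     parts.sort()
--
--     for a in parts:
--         for s in range(limit, a - 1, -1):
--             dp[s] += dp[s - a]
--     return dp
-- ===== SOURCE B (Python) =====
-- def special_partitions_up_to(limit: int) -> list[int]:
--     """Two independent distinct-part knapsacks (odd parts, multiples of 4),
--     combined by convolution; exact big-int arithmetic throughout."""
--     if limit < 0:
--         return []
--
--     def knapsack(parts):
--         dp = [0] * (limit + 1)
--         dp[0] = 1
--         for a in parts:
--             for s in range(limit, a - 1, -1):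
--                 dp[s] += dp[s - a]
--         return dp
--
--     odd = knapsack(range(1, limit + 1, 2))
--     four = knapsack(range(4, limit + 1, 4))
--     res = [0] * (limit + 1)
--     for j in range(0, limit + 1):
--         fj = four[j]
--         if fj:
--             for n in range(j, limit + 1):
--                 res[n] += fj * odd[n - j]
--     return res
-- ===== Notes on version B (the rewrite author's own statement) =====
-- stated objective: alternative
-- what changed: Instead of one 0/1 knapsack over the sorted merge of odd parts and multiples of 4, B runs two independent knapsacks (one per disjoint part family) and combines the counts by a convolution dp[n] = sum_k odd[k]*four[n-k].
import Mathlib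
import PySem

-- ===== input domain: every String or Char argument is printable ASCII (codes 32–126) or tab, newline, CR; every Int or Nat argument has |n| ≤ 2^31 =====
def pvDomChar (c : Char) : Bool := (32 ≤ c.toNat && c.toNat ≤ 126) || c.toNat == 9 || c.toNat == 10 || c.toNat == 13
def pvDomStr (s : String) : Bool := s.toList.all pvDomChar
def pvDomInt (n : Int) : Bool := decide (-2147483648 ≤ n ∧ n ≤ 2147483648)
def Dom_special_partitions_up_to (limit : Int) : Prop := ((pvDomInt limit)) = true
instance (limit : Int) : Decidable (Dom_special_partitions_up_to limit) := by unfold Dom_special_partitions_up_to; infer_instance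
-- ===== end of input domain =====

-- B replaces A's single 0/1 knapsack over the sorted merge of both part families by two
-- independent knapsacks (odd parts / multiples of 4) combined afterwards by a convolution
-- (alternative decomposition; same exact values).

-- ===== PORT A =====
-- literal port of A: dp = [0]*(limit+1); dp[0] = 1; parts = odds ++ fours, sorted;
-- for a in parts: for s in range(limit, a-1, -1): dp[s] += dp[s-a]
def special_partitions_up_to (limit : Int) : List Int :=
  if limit < 0 then []
  else
    let dp := PySem.List.pySetD (PySem.List.pyRepeat [(0 : Int)] (limit + 1)) 0 1
    let parts := PySem.List.sorted
      (PySem.List.pyRange 1 (limit + 1) 2 ++ PySem.List.pyRange 4 (limit + 1) 4)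
      (fun x => x) false
    parts.foldl (fun dp a =>
      (PySem.List.pyRange limit (a - 1) (-1)).foldl
        (fun d s =>
          PySem.List.pySetD d s (PySem.List.pyGetD d s 0 + PySem.List.pyGetD d (s - a) 0)) dp) dp

-- ===== PORT B =====
-- helper of Source B: the distinct-part 0/1 knapsack for one part list
def pvKnapsack (limit : Int) (parts : List Int) : List Int :=
  let dp := PySem.List.pySetD (PySem.List.pyRepeat [(0 : Int)] (limit + 1)) 0 1
  parts.foldl (fun dp a =>
    (PySem.List.pyRange limit (a - 1) (-1)).foldl
      (fun d s =>
        PySem.List.pySetD d s (PySem.List.pyGetD d s 0 + PySem.List.pyGetD d (s - a) 0)) dp) dp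

-- Source B: odd/four knapsacks, then res[n] += four[j]*odd[n-j] for each j with four[j] != 0
def special_partitions_up_to_alt (limit : Int) : List Int :=
  if limit < 0 then []
  else
    let odd := pvKnapsack limit (PySem.List.pyRange 1 (limit + 1) 2)
    let four := pvKnapsack limit (PySem.List.pyRange 4 (limit + 1) 4)
    let res := PySem.List.pyRepeat [(0 : Int)] (limit + 1)
    (PySem.List.pyRange 0 (limit + 1) 1).foldl (fun res j =>
      let fj := PySem.List.pyGetD four j 0
      if fj ≠ 0 then
        (PySem.List.pyRange j (limit + 1) 1).foldl
          (fun r n => PySem.List.pySetD r n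
            (PySem.List.pyGetD r n 0 + fj * PySem.List.pyGetD odd (n - j) 0)) res
      else res) res

-- ===== PRECONDITION & SPEC =====
def Spec_special_partitions_up_to (limit : Int) (out : List Int) : Prop := out = special_partitions_up_to_alt limit
instance (limit : Int) (out : List Int) : Decidable (Spec_special_partitions_up_to limit out) := by unfold Spec_special_partitions_up_to; infer_instance

-- ===== CLAIM (what is proved, stated in full; the proofs are below) =====
def Claim_equal_special_partitions_up_to : Prop := ∀ (limit : Int), Dom_special_partitions_up_to limit → Spec_special_partitions_up_to limit (special_partitions_up_to limit)

-- ===== LEMMAS AND PROOFS =====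

-- functional model of the dp array (one knapsack step per part) and the convolution
def pvDelta : Nat → Int := fun s => if s = 0 then 1 else 0

def pvStep (a : Nat) (f : Nat → Int) : Nat → Int :=
  fun s => f s + if a ≤ s then f (s - a) else 0

def pvFold (ps : List Nat) (f : Nat → Int) : Nat → Int :=
  ps.foldl (fun g a => pvStep a g) f

def pvConv (g h : Nat → Int) : Nat → Int :=
  fun n => ∑ k ∈ Finset.range (n + 1), g k * h (n - k)

def pvLoop (a t : Int) (dp : List Int) : List Int :=
  (PySem.List.pyRange t (a - 1) (-1)).foldl
    (fun d s =>
      PySem.List.pySetD d s (PySem.List.pyGetD d s 0 + PySem.List.pyGetD d (s - a) 0)) dp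

theorem pv_getD_set (xs : List Int) (n m : Nat) (v d : Int) (hn : n < xs.length) :
    (xs.set n v).getD m d = if m = n then v else xs.getD m d := by
  simp only [List.getD_eq_getElem?_getD, List.getElem?_set]
  by_cases h : m = n
  · subst h; simp [hn]
  · rw [if_neg h, if_neg (by omega : ¬ n = m)]

theorem pvLoop_length (a t : Int) (dp : List Int) : (pvLoop a t dp).length = dp.length := by
  unfold pvLoop
  generalize PySem.List.pyRange t (a - 1) (-1) = l
  induction l generalizing dp with
  | nil => rfl
  | cons x xs ih => simp [List.foldl_cons, ih, PySem.List.length_pySetD]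

theorem pvLoop_getD (a : Int) (ha : 1 ≤ a) (m : Nat) (dp : List Int)
    (ht : a - 1 + m < (dp.length : Int)) (s : Nat) :
    (pvLoop a (a - 1 + m) dp).getD s 0 =
      if (s : Int) ≤ a - 1 + m ∧ a ≤ (s : Int)
      then dp.getD s 0 + dp.getD (s - a.toNat) 0 else dp.getD s 0 := by
  induction m generalizing dp with
  | zero =>
    rw [pvLoop, PySem.List.pyRange_neg_one_eq_nil (by omega)]
    simp only [List.foldl_nil]
    rw [if_neg (by omega)]
  | succ m ih =>
    have hcons : PySem.List.pyRange (a - 1 + (m+1 : Nat)) (a - 1) (-1)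
        = (a - 1 + (m+1 : Nat)) :: PySem.List.pyRange (a - 1 + (m+1 : Nat) - 1) (a - 1) (-1) := by
      exact PySem.List.pyRange_neg_one_cons (by push_cast; omega)
    set t : Int := a - 1 + (m+1 : Nat) with htdef
    -- the updated head value
    have h0t : (0:Int) ≤ t := by omega
    have htlen : t < (dp.length : Int) := by omega
    set v : Int := PySem.List.pyGetD dp t 0 + PySem.List.pyGetD dp (t - a) 0 with hvdef
    have hstep : pvLoop a t dp = pvLoop a (a - 1 + (m:Nat)) (dp.set t.toNat v) := by
      rw [pvLoop, hcons, List.foldl_cons, ← hvdef]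
      rw [PySem.List.pySetD_of_nonneg _ _ h0t]
      have : t - 1 = a - 1 + (m : Nat) := by omega
      rw [pvLoop, this]
    rw [hstep, ih (dp.set t.toNat v) (by simp; omega)]
    -- now pure index bookkeeping
    have hlen' : t.toNat < dp.length := by omega
    have hva : v = dp.getD t.toNat 0 + dp.getD (t.toNat - a.toNat) 0 := by
      rw [hvdef, PySem.List.pyGetD_eq_getElem dp 0 h0t htlen,
          PySem.List.pyGetD_eq_getElem dp 0 (by omega) (by omega),
          List.getD_eq_getElem _ _ hlen', List.getD_eq_getElem _ _ (by omega)]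
      congr 2
      omega
    rw [pv_getD_set _ _ _ _ _ hlen', pv_getD_set _ _ _ _ _ hlen']
    by_cases hs : s = t.toNat
    · subst hs
      rw [if_neg (by omega), if_pos rfl, if_pos (by omega), hva]
    · by_cases hc : (s : Int) ≤ a - 1 + (m:Nat) ∧ a ≤ (s:Int)
      · rw [if_pos hc, if_neg hs, if_neg (show ¬ s - a.toNat = t.toNat by omega),
            if_pos (show (s:Int) ≤ t ∧ a ≤ (s:Int) by omega)]
      · rw [if_neg hc, if_neg hs, if_neg (show ¬((s:Int) ≤ t ∧ a ≤ (s:Int)) by omega)]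

theorem pvStep_comm (a b : Nat) (f : Nat → Int) : pvStep a (pvStep b f) = pvStep b (pvStep a f) := by
  funext s
  simp only [pvStep]
  have hss : s - a - b = s - b - a := by omega
  split_ifs <;> first | omega | ((try rw [hss]); ring)

theorem pvFold_perm {ps qs : List Nat} (h : ps.Perm qs) (f : Nat → Int) :
    pvFold ps f = pvFold qs f := by
  exact @List.Perm.foldl_eq _ _ _ _ _ ⟨fun g a b => pvStep_comm b a g⟩ h f

theorem pvConv_delta (g : Nat → Int) : pvConv g pvDelta = g := by
  funext n
  unfold pvConv pvDelta
  rw [Finset.sum_eq_single_of_mem n (by simp)]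
  · simp
  · intro k hk hkn
    rw [if_neg (by simp at hk; omega), mul_zero]

theorem pvConv_step (a : Nat) (g h : Nat → Int) :
    pvConv g (pvStep a h) = pvStep a (pvConv g h) := by
  funext n
  simp only [pvConv, pvStep]
  have expand : ∀ k, g k * (h (n - k) + if a ≤ n - k then h (n - k - a) else 0)
      = g k * h (n - k) + if a ≤ n - k then g k * h (n - k - a) else 0 := by
    intro k; split_ifs <;> ring
  simp only [expand, Finset.sum_add_distrib]
  congr 1
  by_cases han : a ≤ n
  · rw [if_pos han]
    rw [← Finset.sum_subset (by intro x hx; simp at hx ⊢; omega :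
          Finset.range (n - a + 1) ⊆ Finset.range (n + 1))
        (by intro k hk hk'; simp at hk hk'; rw [if_neg (by omega)])]
    apply Finset.sum_congr rfl
    intro k hk
    simp at hk
    rw [if_pos (by omega)]
    congr 2
    omega
  · rw [if_neg han, Finset.sum_eq_zero]
    intro k hk
    simp at hk
    rw [if_neg (by omega)]

theorem pvConv_fold (l : List Nat) (g h : Nat → Int) :
    pvConv g (pvFold l h) = pvFold l (pvConv g h) := by
  induction l generalizing h with
  | nil => rfl
  | cons a l ih => simp only [pvFold, List.foldl_cons] at *; rw [ih (pvStep a h), pvConv_step]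

theorem pvModel_main (o m : List Nat) :
    pvFold (o ++ m) pvDelta = pvConv (pvFold o pvDelta) (pvFold m pvDelta) := by
  rw [pvConv_fold, pvConv_delta]
  simp [pvFold, List.foldl_append]

theorem pvInit (N : Nat) :
    (PySem.List.pySetD (PySem.List.pyRepeat [(0 : Int)] ((N : Int) + 1)) 0 1).length = N + 1 ∧
    ∀ s, s ≤ N →
      (PySem.List.pySetD (PySem.List.pyRepeat [(0 : Int)] ((N : Int) + 1)) 0 1).getD s 0 = pvDelta s := by
  rw [PySem.List.pyRepeat_singleton, PySem.List.pySetD_of_nonneg _ _ (by omega)]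
  have hn : ((N : Int) + 1).toNat = N + 1 := by omega
  rw [hn]
  constructor
  · simp
  · intro s hs
    unfold pvDelta
    rcases Nat.eq_zero_or_pos s with h | h
    · subst h; simp
    · rw [if_neg (by omega)]
      simp [List.getD_eq_getElem?_getD, (by omega : s < N + 1),
        List.getElem_set, List.getElem_replicate]
      omega

theorem pvKnap_fold (N : Nat) (ps : List Int) : ∀ (dp : List Int) (f : Nat → Int),
    (∀ p ∈ ps, 1 ≤ p) → dp.length = N + 1 → (∀ s, s ≤ N → dp.getD s 0 = f s) →
    (ps.foldl (fun dp a => pvLoop a (N : Int) dp) dp).length = N + 1 ∧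
    ∀ s, s ≤ N → (ps.foldl (fun dp a => pvLoop a (N : Int) dp) dp).getD s 0 =
      pvFold (ps.map Int.toNat) f s := by
  induction ps with
  | nil => intro dp f _ hlen hf; exact ⟨hlen, by simpa [pvFold] using hf⟩
  | cons a ps ih =>
    intro dp f hps hlen hf
    have ha : 1 ≤ a := hps a (by simp)
    have hm : (N : Int) = a - 1 + ((N + 1 - a.toNat : Nat) : Int) ∨ (N : Int) < a - 1 := by omega
    have hstep : ∀ s, s ≤ N → (pvLoop a (N : Int) dp).getD s 0 = pvStep a.toNat f s := by
      intro s hs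
      rcases hm with hm | hm
      · rw [hm, pvLoop_getD a ha _ dp (by rw [← hm]; omega)]
        rw [← hm]
        by_cases hc : a ≤ (s : Int)
        · rw [if_pos ⟨by omega, hc⟩, pvStep, if_pos (by omega), hf s hs, hf _ (by omega)]
        · rw [if_neg (by omega), pvStep, if_neg (by omega), hf s hs, add_zero]
      · -- a > N+ : empty range
        rw [pvLoop, PySem.List.pyRange_neg_one_eq_nil (by omega), List.foldl_nil,
            pvStep, if_neg (by omega), hf s hs, add_zero]
    have hlen' : (pvLoop a (N : Int) dp).length = N + 1 := by rw [pvLoop_length, hlen]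
    have := ih (pvLoop a (N : Int) dp) (pvStep a.toNat f) (fun p hp => hps p (by simp [hp]))
      hlen' hstep
    simpa [pvFold] using this

theorem pv_sum_bridge (n : Nat) (f : Nat → Int) :
    ((List.range n).map f).sum = ∑ i ∈ Finset.range n, f i := by
  induction n with
  | zero => simp
  | succ m ih => simp [List.range_succ, Finset.sum_range_succ, ih]

theorem pvScat_getD (g : List Int) (fj j : Int) :
    ∀ (m : Nat) (c : Int) (r : List Int), 0 ≤ c → c + m = (r.length : Int) → ∀ s : Nat,
    ((PySem.List.pyRange c (r.length : Int) 1).foldl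
        (fun r n => PySem.List.pySetD r n
          (PySem.List.pyGetD r n 0 + fj * PySem.List.pyGetD g (n - j) 0)) r).getD s 0 =
      if c ≤ (s : Int) ∧ (s : Int) < (r.length : Int)
      then r.getD s 0 + fj * PySem.List.pyGetD g ((s : Int) - j) 0 else r.getD s 0 := by
  intro m
  induction m with
  | zero =>
    intro c r hc hm s
    rw [PySem.List.pyRange_one_eq_nil (by omega), List.foldl_nil, if_neg (by omega)]
  | succ m ih =>
    intro c r hc hm s
    rw [PySem.List.pyRange_one_cons (by omega), List.foldl_cons]
    have hclen : c < (r.length : Int) := by omega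
    set v : Int := PySem.List.pyGetD r c 0 + fj * PySem.List.pyGetD g (c - j) 0 with hv
    have hset : PySem.List.pySetD r c v = r.set c.toNat v :=
      PySem.List.pySetD_of_nonneg _ _ hc
    have hlen' : (r.set c.toNat v).length = r.length := by simp
    have := ih (c + 1) (r.set c.toNat v) (by omega) (by rw [hlen']; omega) s
    rw [hlen'] at this
    rw [hset, this]
    have hcN : c.toNat < r.length := by omega
    by_cases hs : s = c.toNat
    · subst hs
      rw [if_neg (by omega), if_pos (by omega), pv_getD_set _ _ _ _ _ hcN, if_pos rfl, hv,
          PySem.List.pyGetD_eq_getElem r 0 hc hclen, List.getD_eq_getElem _ _ hcN,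
          (by omega : (c.toNat : Int) = c)]
    · rw [pv_getD_set _ _ _ _ _ hcN, if_neg hs]
      by_cases h1 : c + 1 ≤ (s : Int) ∧ (s : Int) < (r.length : Int)
      · rw [if_pos h1, if_pos (by omega)]
      · rw [if_neg h1, if_neg (by omega)]

theorem pv_scat_len (g : List Int) (fj j : Int) (l : List Int) : ∀ r : List Int,
    (l.foldl (fun r n => PySem.List.pySetD r n
      (PySem.List.pyGetD r n 0 + fj * PySem.List.pyGetD g (n - j) 0)) r).length = r.length := by
  induction l with
  | nil => intro r; rfl
  | cons x xs ih => intro r; simp only [List.foldl_cons]; rw [ih, PySem.List.length_pySetD]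

theorem pvOuter (N : Nat) (four g : List Int) :
    ∀ (js : List Int) (res : List Int), (∀ j ∈ js, 0 ≤ j ∧ j ≤ (N : Int)) →
    res.length = N + 1 →
    (js.foldl (fun res j =>
        let fj := PySem.List.pyGetD four j 0
        if fj ≠ 0 then
          (PySem.List.pyRange j ((N : Int) + 1) 1).foldl
            (fun r n => PySem.List.pySetD r n
              (PySem.List.pyGetD r n 0 + fj * PySem.List.pyGetD g (n - j) 0)) res
        else res) res).length = N + 1 ∧
    ∀ s : Nat, s ≤ N →
      (js.foldl (fun res j =>
        let fj := PySem.List.pyGetD four j 0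
        if fj ≠ 0 then
          (PySem.List.pyRange j ((N : Int) + 1) 1).foldl
            (fun r n => PySem.List.pySetD r n
              (PySem.List.pyGetD r n 0 + fj * PySem.List.pyGetD g (n - j) 0)) res
        else res) res).getD s 0 =
      res.getD s 0 + (js.map (fun j =>
        if j ≤ (s : Int) then PySem.List.pyGetD four j 0 * PySem.List.pyGetD g ((s : Int) - j) 0
        else 0)).sum := by
  intro js
  induction js with
  | nil => intro res _ hlen; exact ⟨hlen, fun s _ => by simp⟩
  | cons j js ih =>
    intro res hjs hlen
    obtain ⟨hj0, hjN⟩ := hjs j (by simp)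
    simp only [List.foldl_cons]
    set fj : Int := PySem.List.pyGetD four j 0 with hfj
    have key : ∀ res1 : List Int,
        res1 = (if fj ≠ 0 then
          (PySem.List.pyRange j ((N : Int) + 1) 1).foldl
            (fun r n => PySem.List.pySetD r n
              (PySem.List.pyGetD r n 0 + fj * PySem.List.pyGetD g (n - j) 0)) res
        else res) →
        res1.length = N + 1 ∧ ∀ s : Nat, s ≤ N → res1.getD s 0 =
          res.getD s 0 + (if j ≤ (s : Int) then fj * PySem.List.pyGetD g ((s : Int) - j) 0 else 0) := by
      intro res1 h1
      by_cases hz : fj ≠ 0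
      · rw [if_pos hz] at h1
        have hup : ((N : Int) + 1) = (res.length : Int) := by rw [hlen]; push_cast; ring
        rw [hup] at h1
        constructor
        · rw [h1, pv_scat_len]; exact hlen
        · intro s hs
          rw [h1, pvScat_getD g fj j (res.length - j.toNat) j res hj0 (by omega) s]
          by_cases hc : j ≤ (s : Int)
          · rw [if_pos ⟨hc, by omega⟩, if_pos hc]
          · rw [if_neg (by omega), if_neg hc, add_zero]
      · rw [if_neg hz] at h1
        rw [not_not] at hz
        refine ⟨by rw [h1]; exact hlen, fun s hs => ?_⟩
        rw [h1, hz]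
        split_ifs <;> simp
    obtain ⟨hlen1, hget1⟩ := key _ rfl
    obtain ⟨hlen2, hget2⟩ := ih _ (fun p hp => hjs p (by simp [hp])) hlen1
    refine ⟨hlen2, fun s hs => ?_⟩
    rw [hget2 s hs, hget1 s hs, List.map_cons, List.sum_cons]
    ring

theorem pv_main (limit : Int) : special_partitions_up_to limit = special_partitions_up_to_alt limit := by
  by_cases hneg : limit < 0
  · rw [special_partitions_up_to, special_partitions_up_to_alt, if_pos hneg, if_pos hneg]
  · obtain ⟨N, rfl⟩ : ∃ N : Nat, limit = (N : Int) := ⟨limit.toNat, by omega⟩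
    set O := PySem.List.pyRange 1 ((N : Int) + 1) 2 with hO
    set F := PySem.List.pyRange 4 ((N : Int) + 1) 4 with hF
    set dp0 := PySem.List.pySetD (PySem.List.pyRepeat [(0 : Int)] ((N : Int) + 1)) 0 1 with hdp0
    set parts := PySem.List.sorted (O ++ F) (fun x => x) false with hparts
    have hmemO : ∀ p ∈ O, 1 ≤ p := by
      intro p hp
      rw [hO, PySem.List.mem_pyRange_iff_of_pos (by norm_num)] at hp
      omega
    have hmemF : ∀ p ∈ F, 1 ≤ p := by
      intro p hp
      rw [hF, PySem.List.mem_pyRange_iff_of_pos (by norm_num)] at hp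
      omega
    have hmem : ∀ p ∈ parts, 1 ≤ p := by
      intro p hp
      rw [hparts, PySem.List.mem_sorted, List.mem_append] at hp
      rcases hp with hp | hp
      · exact hmemO p hp
      · exact hmemF p hp
    obtain ⟨hlen0, hget0⟩ := pvInit N
    have hA : special_partitions_up_to (N : Int) =
        parts.foldl (fun dp a => pvLoop a (N : Int) dp) dp0 := by
      rw [special_partitions_up_to, if_neg hneg]
      rfl
    obtain ⟨hAlen, hAget⟩ := pvKnap_fold N parts dp0 pvDelta hmem hlen0 hget0
    have hmodel : ∀ s, pvFold (parts.map Int.toNat) pvDelta s =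
        pvConv (pvFold (F.map Int.toNat) pvDelta) (pvFold (O.map Int.toNat) pvDelta) s := by
      intro s
      have hperm : (parts.map Int.toNat).Perm ((F ++ O).map Int.toNat) :=
        (((PySem.List.sorted_perm (O ++ F) (fun x => x) false)).trans
          List.perm_append_comm).map Int.toNat
      rw [pvFold_perm hperm, List.map_append, pvModel_main]
    obtain ⟨hOlen, hOget⟩ := pvKnap_fold N O dp0 pvDelta hmemO hlen0 hget0
    obtain ⟨hFlen, hFget⟩ := pvKnap_fold N F dp0 pvDelta hmemF hlen0 hget0
    set oddL := O.foldl (fun dp a => pvLoop a (N : Int) dp) dp0 with hoddL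
    set fourL := F.foldl (fun dp a => pvLoop a (N : Int) dp) dp0 with hfourL
    set res0 := PySem.List.pyRepeat [(0 : Int)] ((N : Int) + 1) with hres0
    have hres0len : res0.length = N + 1 := by
      rw [hres0, PySem.List.pyRepeat_singleton, List.length_replicate]; omega
    have hres0get : ∀ s : Nat, s ≤ N → res0.getD s 0 = 0 := by
      intro s hs
      rw [hres0, PySem.List.pyRepeat_singleton, List.getD_eq_getElem _ _ (by simp; omega)]
      simp
    have hB : special_partitions_up_to_alt (N : Int) =
        (PySem.List.pyRange 0 ((N : Int) + 1) 1).foldl (fun res j =>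
          let fj := PySem.List.pyGetD fourL j 0
          if fj ≠ 0 then
            (PySem.List.pyRange j ((N : Int) + 1) 1).foldl
              (fun r n => PySem.List.pySetD r n
                (PySem.List.pyGetD r n 0 + fj * PySem.List.pyGetD oddL (n - j) 0)) res
          else res) res0 := by
      rw [special_partitions_up_to_alt, if_neg hneg]
      rfl
    have hjs : ∀ j ∈ PySem.List.pyRange 0 ((N : Int) + 1) 1, 0 ≤ j ∧ j ≤ (N : Int) := by
      intro j hj
      rw [PySem.List.mem_pyRange_one] at hj
      omega
    obtain ⟨hBlen, hBget⟩ := pvOuter N fourL oddL (PySem.List.pyRange 0 ((N : Int) + 1) 1)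
      res0 hjs hres0len
    rw [hA, hB]
    apply List.ext_getElem
    · rw [hAlen, hBlen]
    · intro s hs hs2
      have hsN : s ≤ N := by rw [hAlen] at hs; omega
      rw [← List.getD_eq_getElem _ 0 hs, ← List.getD_eq_getElem _ 0 hs2,
          hAget s hsN, hBget s hsN, hres0get s hsN, zero_add, hmodel s]
      -- remaining: the list sum equals the convolution
      have hcast : ((N : Int) + 1) = ((N + 1 : Nat) : Int) := by push_cast; ring
      rw [hcast, PySem.List.pyRange_zero_natCast, List.map_map, pv_sum_bridge]
      rw [pvConv]
      rw [← Finset.sum_subset (by intro x hx; simp at hx ⊢; omega :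
            Finset.range (s + 1) ⊆ Finset.range (N + 1))
          (by intro k hk hk'
              simp only [Finset.mem_range] at hk hk'
              simp only [Function.comp_apply]
              rw [if_neg (by omega)])]
      apply Finset.sum_congr rfl
      intro k hk
      simp only [Finset.mem_range] at hk
      simp only [Function.comp_apply]
      rw [if_pos (by omega : (k : Int) ≤ (s : Int)),
          PySem.List.pyGetD_natCast, (by omega : (s : Int) - (k : Int) = ((s - k : Nat) : Int)),
          PySem.List.pyGetD_natCast, hFget k (by omega), hOget (s - k) (by omega)]

-- ===== VERDICT (by name: the statement is the Claim_ definition above) =====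
theorem special_partitions_up_to_spec : Claim_equal_special_partitions_up_to := by
  intro limit _hdom
  unfold Spec_special_partitions_up_to
  exact pv_main limit
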